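-- pv_equiv track=rewrite | github.com/sueszli/vector-database-benchmark | dataset/python-mutated/The-Asintota.py | check
-- ===== SOURCE A (Python) =====
-- def check(num):
--     if False:
--         return 10
--     if num < 0 or type(num) == type(1.0):
--         return 'El numero debe ser un entenero positovo.'
--     resultado = ''
--     if num % 2 == 0:
--         resultado += 'El nunero {} es par, '.format(num)
--     else:
--         resultado += 'El numero {} es impar, '.format(num)
--     pos_0 = 0
--     pos_1 = 1
--     fibbo = False
--     while pos_0 <= num:
--         if pos_0 == num:
--             fibbo = True
--         suma = pos_0 + pos_1
--         pos_0 = pos_1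
--         pos_1 = suma
--     if fibbo == True:
--         resultado += 'pertenece a la sucesion de fibbonaci y '
--     else:
--         resultado += 'no pertenece a la sucesion de fibbonaci y '
--     primo = True
--     if num == 2:
--         resultado += 'es primo.'
--     elif num == 1:
--         resultado += 'no es primo.'
--     else:
--         for n in range(2, num):
--             if num % n == 0:
--                 primo = False
--         if primo == True:
--             resultado += 'es primo.'
--         else:
--             resultado += 'no es primo.'
--     return resultado
-- ===== SOURCE B (Python) =====
-- def _isqrt(n):
--     # integer square root by Newton's method (no imports in the original module)
--     if n <= 1:
--         return n
--     guess = 1 << ((n.bit_length() - 1) // 2 + 1)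
--     while True:
--         nxt = (guess + n // guess) // 2
--         if nxt < guess:
--             guess = nxt
--         else:
--             return guess
--
--
-- def _is_square(m):
--     if m < 0:
--         return False
--     s = _isqrt(m)
--     return s * s == m
--
--
-- def _is_fib(n):
--     a = 5 * n * n
--     return _is_square(a + 4) or _is_square(a - 4)
--
--
-- def check(num):
--     if num < 0:
--         return 'El numero debe ser un entenero positovo.'
--     parity = ('El nunero {} es par, ' if num % 2 == 0 else 'El numero {} es impar, ').format(num)
--     fib = ('pertenece a la sucesion de fibbonaci y ' if _is_fib(num)
--            else 'no pertenece a la sucesion de fibbonaci y ')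
--     if num == 2:
--         prime = 'es primo.'
--     elif num == 1:
--         prime = 'no es primo.'
--     elif all(num % d != 0 for d in range(2, _isqrt(num) + 1)):
--         prime = 'es primo.'
--     else:
--         prime = 'no es primo.'
--     return parity + fib + prime
-- ===== Notes on version B (the rewrite author's own statement) =====
-- stated objective: faster
-- what changed: The Fibonacci-membership while-loop is replaced by the closed-form perfect-square test (5n^2+4 or 5n^2-4 is a square, via an integer Newton isqrt), and the trial-division primality loop over range(2,num) is bounded by isqrt(num) instead.
import Mathlib
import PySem

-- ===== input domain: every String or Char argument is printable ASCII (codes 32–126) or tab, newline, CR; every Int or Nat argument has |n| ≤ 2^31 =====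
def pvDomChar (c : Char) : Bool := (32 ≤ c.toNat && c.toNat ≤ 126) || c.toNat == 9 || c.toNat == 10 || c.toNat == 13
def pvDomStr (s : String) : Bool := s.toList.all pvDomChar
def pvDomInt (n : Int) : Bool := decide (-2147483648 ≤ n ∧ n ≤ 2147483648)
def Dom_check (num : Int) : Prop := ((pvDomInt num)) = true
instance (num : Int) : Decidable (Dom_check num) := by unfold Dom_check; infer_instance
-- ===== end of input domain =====

-- B replaces A's Fibonacci while-loop by the closed-form 5n²±4 perfect-square test (Newton isqrt)
-- and bounds the trial-division primality loop by isqrt(num); objective: faster.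

-- ===== PORT A =====
-- A's while-loop over (pos_0, pos_1); the three proof arguments are loop invariants
-- (true at the initial call (0,1) and preserved) used only for termination.
def fibLoopA (num pos0 pos1 : Int) (fibbo : Bool)
    (h1 : 0 < pos1) (h2 : pos0 ≤ pos1) (h3 : pos1 ≤ 2 * pos0 + 1) : Bool :=
  if _h : pos0 ≤ num then
    fibLoopA num pos1 (pos0 + pos1) (if pos0 == num then true else fibbo)
      (by omega) (by omega) (by omega)
  else fibbo
termination_by (3 * num + 2 - pos0 - pos1).toNat
decreasing_by omega

-- `if False: return 10` is dead code and `type(num) == type(1.0)` is False for an int argument.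
def check (num : Int) : String :=
  if num < 0 then "El numero debe ser un entenero positovo."
  else
    let resultado := ""
    let resultado := if PySem.Int.mod num 2 == 0 then
        resultado ++ ("El nunero " ++ PySem.Int.toStr num ++ " es par, ")
      else resultado ++ ("El numero " ++ PySem.Int.toStr num ++ " es impar, ")
    let fibbo := fibLoopA num 0 1 false (by omega) (by omega) (by omega)
    let resultado := if fibbo then resultado ++ "pertenece a la sucesion de fibbonaci y "
      else resultado ++ "no pertenece a la sucesion de fibbonaci y "
    if num == 2 then resultado ++ "es primo."
    else if num == 1 then resultado ++ "no es primo."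
    else
      let primo := (PySem.List.pyRange 2 num 1).foldl
        (fun primo n => if PySem.Int.mod num n == 0 then false else primo) true
      if primo then resultado ++ "es primo." else resultado ++ "no es primo."

-- ===== PORT B =====
-- Source B's Newton loop (the same iteration as Batteries' Nat.sqrt.iter).
def isqrtIterB (n guess : Nat) : Nat :=
  let nxt := (guess + n / guess) / 2
  if _h : nxt < guess then isqrtIterB n nxt else guess
termination_by guess

-- Source B's _isqrt; `n.bit_length() - 1 = Nat.log2 n` for n ≥ 2, so the initial guess matches.
def isqrtB (n : Nat) : Nat :=
  if n ≤ 1 then n else isqrtIterB n (1 <<< (n.log2 / 2 + 1))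

-- Source B's _is_square (its argument can be negative: 5*0*0 - 4); _isqrt is only reached for m ≥ 0,
-- where Python's nonnegative int is m.toNat (exact).
def isSquareB (m : Int) : Bool :=
  if m < 0 then false else isqrtB m.toNat * isqrtB m.toNat == m.toNat

-- Source B's _is_fib
def isFibB (n : Int) : Bool :=
  let a := 5 * n * n
  isSquareB (a + 4) || isSquareB (a - 4)

def check_alt (num : Int) : String :=
  if num < 0 then "El numero debe ser un entenero positovo."
  else
    let parity := if PySem.Int.mod num 2 == 0 then
        "El nunero " ++ PySem.Int.toStr num ++ " es par, "
      else "El numero " ++ PySem.Int.toStr num ++ " es impar, "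
    let fib := if isFibB num then "pertenece a la sucesion de fibbonaci y "
      else "no pertenece a la sucesion de fibbonaci y "
    let prime := if num == 2 then "es primo."
      else if num == 1 then "no es primo."
      else if (PySem.List.pyRange 2 ((isqrtB num.toNat : Int) + 1) 1).all
          (fun d => !(PySem.Int.mod num d == 0)) then "es primo."
      else "no es primo."
    parity ++ (fib ++ prime)

-- ===== PRECONDITION & SPEC =====
def Spec_check (num : Int) (out : String) : Prop := out = check_alt num
instance (num : Int) (out : String) : Decidable (Spec_check num out) := by unfold Spec_check; infer_instance

-- ===== CLAIM (what is proved, stated in full; the proofs are below) =====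
def Claim_equal_check : Prop := ∀ (num : Int), Dom_check num → Spec_check num (check num)

-- ===== LEMMAS AND PROOFS =====

-- my Newton iteration is Batteries' Nat.sqrt.iter
theorem isqrtIterB_eq (n : Nat) : ∀ guess : Nat, isqrtIterB n guess = Nat.sqrt.iter n guess := by
  intro guess
  induction guess using Nat.strong_induction_on with
  | _ guess ih =>
    rw [isqrtIterB, Nat.sqrt.iter]
    by_cases h : (guess + n / guess) / 2 < guess
    · simp only [dif_pos h]
      exact ih _ h
    · simp only [dif_neg h]

theorem isqrtB_eq (n : Nat) : isqrtB n = Nat.sqrt n := by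
  rw [isqrtB, Nat.sqrt]
  split
  · rfl
  · exact isqrtIterB_eq _ _

theorem isSquareB_iff (m : Int) : isSquareB m = true ↔ ∃ s : Int, 0 ≤ s ∧ s * s = m := by
  by_cases hm : m < 0
  · simp only [isSquareB, if_pos hm]
    constructor
    · intro h; exact absurd h (by simp)
    · rintro ⟨s, hs0, hs⟩; nlinarith
  · replace hm : 0 ≤ m := by omega
    simp only [isSquareB, if_neg (not_lt.mpr hm), isqrtB_eq, beq_iff_eq]
    constructor
    · intro h
      refine ⟨(Nat.sqrt m.toNat : Int), by positivity, ?_⟩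
      have := congrArg (Nat.cast : ℕ → ℤ) h
      push_cast at this
      rw [this, Int.toNat_of_nonneg hm]
    · rintro ⟨s, hs0, hs⟩
      have hnat : s.toNat * s.toNat = m.toNat := by
        have h1 : ((s.toNat : ℤ)) = s := Int.toNat_of_nonneg hs0
        have h2 : ((m.toNat : ℤ)) = m := Int.toNat_of_nonneg hm
        have : ((s.toNat * s.toNat : ℕ) : ℤ) = ((m.toNat : ℕ) : ℤ) := by
          push_cast; rw [h1, h2]; exact hs
        exact_mod_cast this
      exact (Nat.exists_mul_self m.toNat).mp ⟨s.toNat, hnat⟩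

-- Cassini-style invariant of consecutive Fibonacci numbers
theorem fib_inv (k : ℕ) :
    ((Nat.fib (k+1) : ℤ))^2 - (Nat.fib (k+1) : ℤ) * (Nat.fib k : ℤ) - ((Nat.fib k : ℤ))^2
      = (-1)^k := by
  induction k with
  | zero => simp
  | succ k ih =>
    have h' : ((Nat.fib (k+1+1) : ℤ)) = (Nat.fib k : ℤ) + (Nat.fib (k+1) : ℤ) := by
      exact_mod_cast congrArg (Nat.cast : ℕ → ℤ) (Nat.fib_add_two (n := k))
    rw [h', pow_succ]
    linear_combination (-1 : ℤ) * ih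

-- forward: every Fibonacci number passes the square test, with s = 2·fib(k+1) − fib k
theorem fib_to_sq (k : ℕ) :
    0 ≤ 2 * (Nat.fib (k+1) : ℤ) - (Nat.fib k : ℤ) ∧
      ((2 * (Nat.fib (k+1) : ℤ) - (Nat.fib k : ℤ)) * (2 * (Nat.fib (k+1) : ℤ) - (Nat.fib k : ℤ))
          = 5 * (Nat.fib k : ℤ) * (Nat.fib k : ℤ) + 4 ∨
        (2 * (Nat.fib (k+1) : ℤ) - (Nat.fib k : ℤ)) * (2 * (Nat.fib (k+1) : ℤ) - (Nat.fib k : ℤ))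
          = 5 * (Nat.fib k : ℤ) * (Nat.fib k : ℤ) - 4) := by
  have hle : (Nat.fib k : ℤ) ≤ (Nat.fib (k+1) : ℤ) := by
    exact_mod_cast Nat.fib_le_fib_succ
  have hpos : (0:ℤ) ≤ (Nat.fib (k+1) : ℤ) := by positivity
  refine ⟨by omega, ?_⟩
  have hinv := fib_inv k
  rcases Nat.even_or_odd k with he | ho
  · left
    have h1 : ((-1:ℤ))^k = 1 := he.neg_one_pow
    rw [h1] at hinv
    linear_combination 4 * hinv
  · right
    have h1 : ((-1:ℤ))^k = -1 := ho.neg_one_pow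
    rw [h1] at hinv
    linear_combination 4 * hinv

-- converse: a nonnegative solution of s² = 5n² ± 4 is a Fibonacci/Lucas pair (descent on n)
theorem sq_to_fib : ∀ n : ℕ, ∀ s : ℤ, 0 ≤ s →
    (s * s = 5 * (n:ℤ) * n + 4 ∨ s * s = 5 * (n:ℤ) * n - 4) →
    ∃ j : ℕ, Nat.fib j = n ∧ 2 * (Nat.fib (j+1) : ℤ) - (Nat.fib j : ℤ) = s := by
  intro n
  induction n using Nat.strong_induction_on with
  | _ n ih =>
    intro s hs hsq
    rcases Nat.lt_or_ge n 2 with hn | hn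
    · interval_cases n
      · have h4 : s * s = 4 := by
          rcases hsq with h | h
          · push_cast at h; linarith
          · push_cast at h; nlinarith [mul_self_nonneg s]
        have hs2 : s = 2 := by nlinarith [mul_self_nonneg (s-2), mul_self_nonneg (s+2)]
        exact ⟨0, by simp, by simp [hs2, Nat.fib]⟩
      · rcases hsq with h | h
        · have hs3 : s = 3 := by
            push_cast at h
            nlinarith [mul_self_nonneg (s-3), mul_self_nonneg (s+3)]
          refine ⟨2, by simp [Nat.fib], ?_⟩
          simp [hs3, Nat.fib]
        · have hs1 : s = 1 := by
            push_cast at h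
            nlinarith [mul_self_nonneg (s-1), mul_self_nonneg (s+1)]
          refine ⟨1, by simp [Nat.fib], ?_⟩
          simp [hs1, Nat.fib]
    · have hn' : (2:ℤ) ≤ (n:ℤ) := by exact_mod_cast hn
      have hgt : (n:ℤ) < s := by rcases hsq with h | h <;> nlinarith
      have hlt : s < 3 * (n:ℤ) := by rcases hsq with h | h <;> nlinarith
      have hdvd : (2:ℤ) ∣ (s - n) := by
        have heven : Even ((s - (n:ℤ)) * (s + n)) := by
          rcases hsq with h | h
          · exact ⟨2*(n:ℤ)*n + 2, by linear_combination h⟩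
          · exact ⟨2*(n:ℤ)*n - 2, by linear_combination h⟩
        rcases Int.even_mul.mp heven with he | he <;>
          · obtain ⟨r, hr⟩ := he; omega
      obtain ⟨c, hc⟩ := hdvd
      have hc1 : 1 ≤ c := by omega
      have hcn : c < (n:ℤ) := by omega
      have hct : ((c.toNat : ℤ)) = c := Int.toNat_of_nonneg (by omega)
      have hmeas : c.toNat < n := by omega
      have hs' : 0 ≤ 2*(n:ℤ) - c := by omega
      have hsq' : (2*(n:ℤ)-c) * (2*(n:ℤ)-c) = 5 * (c.toNat:ℤ) * c.toNat + 4 ∨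
          (2*(n:ℤ)-c) * (2*(n:ℤ)-c) = 5 * (c.toNat:ℤ) * c.toNat - 4 := by
        rw [hct]
        rcases hsq with h | h
        · right; linear_combination (s + (n:ℤ) + 2*c) * hc - h
        · left; linear_combination (s + (n:ℤ) + 2*c) * hc - h
      obtain ⟨j, hj1, hj2⟩ := ih c.toNat hmeas (2*(n:ℤ)-c) hs' hsq'
      have hjc : ((Nat.fib j : ℤ)) = c := by rw [hj1]; exact hct
      have hfib2 : ((Nat.fib (j+1+1) : ℤ)) = (Nat.fib j : ℤ) + (Nat.fib (j+1) : ℤ) := by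
        exact_mod_cast congrArg (Nat.cast : ℕ → ℤ) (Nat.fib_add_two (n := j))
      refine ⟨j+1, ?_, ?_⟩
      · have : ((Nat.fib (j+1) : ℤ)) = (n:ℤ) := by omega
        exact_mod_cast this
      · omega

theorem isFibB_iff (num : Int) (h : 0 ≤ num) :
    isFibB num = true ↔ ∃ j : ℕ, (Nat.fib j : ℤ) = num := by
  simp only [isFibB, Bool.or_eq_true, isSquareB_iff]
  constructor
  · rintro (⟨s, hs0, hs⟩ | ⟨s, hs0, hs⟩)
    · obtain ⟨j, hj1, _⟩ := sq_to_fib num.toNat s hs0 (by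
        left; rw [Int.toNat_of_nonneg h]; linear_combination hs)
      exact ⟨j, by rw [hj1]; exact Int.toNat_of_nonneg h⟩
    · obtain ⟨j, hj1, _⟩ := sq_to_fib num.toNat s hs0 (by
        right; rw [Int.toNat_of_nonneg h]; linear_combination hs)
      exact ⟨j, by rw [hj1]; exact Int.toNat_of_nonneg h⟩
  · rintro ⟨j, hj⟩
    obtain ⟨hpos, hsq⟩ := fib_to_sq j
    rw [← hj]
    rcases hsq with hcase | hcase
    · exact Or.inl ⟨_, hpos, hcase⟩
    · exact Or.inr ⟨_, hpos, hcase⟩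

-- characterization of A's while-loop on a Fibonacci pair
theorem fibLoopA_iff (num : Int) (pos0 pos1 : Int) (fb : Bool)
    (h1 : 0 < pos1) (h2 : pos0 ≤ pos1) (h3 : pos1 ≤ 2 * pos0 + 1) :
    ∀ k : ℕ, pos0 = (Nat.fib k : ℤ) → pos1 = (Nat.fib (k+1) : ℤ) →
      (fibLoopA num pos0 pos1 fb h1 h2 h3 = true ↔
        (fb = true ∨ ∃ j : ℕ, k ≤ j ∧ (Nat.fib j : ℤ) = num)) := by
  induction pos0, pos1, fb, h1, h2, h3 using fibLoopA.induct num with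
  | case1 pos0 pos1 fibbo h1 h2 h3 hle ih =>
    intro k e0 e1
    simp only [dite_eq_ite] at ih
    rw [fibLoopA, dif_pos hle]
    have e2 : pos0 + pos1 = (Nat.fib (k+1+1) : ℤ) := by
      have : ((Nat.fib (k+1+1) : ℤ)) = (Nat.fib k : ℤ) + (Nat.fib (k+1) : ℤ) := by
        exact_mod_cast congrArg (Nat.cast : ℕ → ℤ) (Nat.fib_add_two (n := k))
      omega
    rw [ih (k+1) e1 e2]
    by_cases heq : pos0 = num
    · have hb : (pos0 == num) = true := by simpa using heq
      simp only [hb, if_true]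
      constructor
      · intro _; exact Or.inr ⟨k, le_refl k, by omega⟩
      · intro _; exact Or.inl (by simp)
    · have hb : (pos0 == num) = false := by simpa using heq
      simp only [hb, Bool.false_eq_true, if_false]
      constructor
      · rintro (h | ⟨j, hj, hfj⟩)
        · exact Or.inl h
        · exact Or.inr ⟨j, by omega, hfj⟩
      · rintro (h | ⟨j, hj, hfj⟩)
        · exact Or.inl h
        · refine Or.inr ⟨j, ?_, hfj⟩
          rcases Nat.eq_or_lt_of_le hj with rfl | hlt
          · exact absurd (by omega : pos0 = num) heq
          · omega
  | case2 pos0 pos1 fibbo h1 h2 h3 hgt =>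
    intro k e0 e1
    rw [fibLoopA, dif_neg hgt]
    constructor
    · intro h; exact Or.inl h
    · rintro (h | ⟨j, hj, hfj⟩)
      · exact h
      · have := Nat.fib_mono hj
        have : ((Nat.fib k : ℤ)) ≤ (Nat.fib j : ℤ) := by exact_mod_cast this
        omega

-- A's fibbo equals B's closed-form test
theorem fib_eq (num : Int) (h : 0 ≤ num)
    (h1 : (0:ℤ) < 1) (h2 : (0:ℤ) ≤ 1) (h3 : (1:ℤ) ≤ 2 * 0 + 1) :
    fibLoopA num 0 1 false h1 h2 h3 = isFibB num := by
  rw [Bool.eq_iff_iff]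
  rw [fibLoopA_iff num 0 1 false h1 h2 h3 0 (by simp) (by simp)]
  rw [isFibB_iff num h]
  constructor
  · rintro (h | ⟨j, _, hfj⟩)
    · exact absurd h (by simp)
    · exact ⟨j, hfj⟩
  · rintro ⟨j, hfj⟩
    exact Or.inr ⟨j, Nat.zero_le j, hfj⟩

-- the prime accumulator loop is an `all`
theorem foldl_primo (num : Int) (l : List Int) (b : Bool) :
    l.foldl (fun primo n => if PySem.Int.mod num n == 0 then false else primo) b
      = (b && l.all fun d => !(PySem.Int.mod num d == 0)) := by
  induction l generalizing b with
  | nil => simp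
  | cons a l ih =>
    simp only [List.foldl_cons, List.all_cons, ih]
    by_cases h : PySem.Int.mod num a == 0 <;> simp [h]

-- A's trial division over [2, num) agrees with B's over [2, isqrt num]
theorem primo_eq (num : Int) (h0 : 0 ≤ num) (hn1 : num ≠ 1) (hn2 : num ≠ 2) :
    ((PySem.List.pyRange 2 num 1).foldl
        (fun primo n => if PySem.Int.mod num n == 0 then false else primo) true)
      = (PySem.List.pyRange 2 ((isqrtB num.toNat : Int) + 1) 1).all
          (fun d => !(PySem.Int.mod num d == 0)) := by
  rw [foldl_primo, Bool.true_and, isqrtB_eq]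
  by_cases h00 : num = 0
  · subst h00; decide
  have hge3 : 3 ≤ num := by omega
  have hnum : ((num.toNat : ℤ)) = num := Int.toNat_of_nonneg h0
  have hge3' : 3 ≤ num.toNat := by omega
  rw [Bool.eq_iff_iff, List.all_eq_true, List.all_eq_true]
  constructor
  · intro hall x hx
    rw [PySem.List.mem_pyRange_one] at hx
    refine hall x ?_
    rw [PySem.List.mem_pyRange_one]
    have hsl : Nat.sqrt num.toNat < num.toNat := Nat.sqrt_lt_self (by omega)
    have : ((Nat.sqrt num.toNat : ℤ)) < ((num.toNat : ℤ)) := by exact_mod_cast hsl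
    omega
  · intro hall x hx
    rw [PySem.List.mem_pyRange_one] at hx
    simp only [Bool.not_eq_eq_eq_not, Bool.not_true, beq_eq_false_iff_ne, ne_eq]
    rw [PySem.Int.mod_eq_zero_iff_dvd]
    intro hdvd
    -- x ∣ num with 2 ≤ x < num; pass to naturals
    have hx2 : 2 ≤ x := hx.1
    have hxn : x < num := hx.2
    set m := x.toNat with hm
    have hmx : ((m : ℤ)) = x := Int.toNat_of_nonneg (by omega)
    have hmdvd : m ∣ num.toNat := by
      rw [← Int.natCast_dvd_natCast, hmx, hnum]; exact hdvd
    obtain ⟨kk, hkk⟩ := hmdvd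
    have hm2 : 2 ≤ m := by omega
    have hmlt : m < num.toNat := by omega
    have hk2 : 2 ≤ kk := by
      rcases Nat.lt_or_ge kk 2 with hklt | hkge
      · interval_cases kk <;> omega
      · exact hkge
    -- one of m, kk is ≤ sqrt
    have hsqrt : m ≤ Nat.sqrt num.toNat ∨ kk ≤ Nat.sqrt num.toNat := by
      rcases Nat.lt_or_ge (Nat.sqrt num.toNat) m with hm1 | hm1
      case inr => exact Or.inl hm1
      rcases Nat.lt_or_ge (Nat.sqrt num.toNat) kk with hk1 | hk1
      case inr => exact Or.inr hk1
      exfalso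
      have : num.toNat < m * kk := by
        calc num.toNat < (Nat.sqrt num.toNat + 1) * (Nat.sqrt num.toNat + 1) :=
              Nat.lt_succ_sqrt num.toNat
          _ ≤ m * kk := Nat.mul_le_mul hm1 hk1
      omega
    rcases hsqrt with hsm | hsk
    · have hmem : (m:ℤ) ∈ PySem.List.pyRange 2 ((Nat.sqrt num.toNat : ℤ) + 1) 1 := by
        rw [PySem.List.mem_pyRange_one]
        constructor
        · exact_mod_cast hm2
        · have : ((m:ℤ)) ≤ ((Nat.sqrt num.toNat : ℤ)) := by exact_mod_cast hsm
          omega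
      have := hall _ hmem
      simp only [Bool.not_eq_eq_eq_not, Bool.not_true, beq_eq_false_iff_ne, ne_eq] at this
      rw [PySem.Int.mod_eq_zero_iff_dvd] at this
      exact this (by rw [hmx]; exact hdvd)
    · have hmem : (kk:ℤ) ∈ PySem.List.pyRange 2 ((Nat.sqrt num.toNat : ℤ) + 1) 1 := by
        rw [PySem.List.mem_pyRange_one]
        constructor
        · exact_mod_cast hk2
        · have : ((kk:ℤ)) ≤ ((Nat.sqrt num.toNat : ℤ)) := by exact_mod_cast hsk
          omega
      have := hall _ hmem
      simp only [Bool.not_eq_eq_eq_not, Bool.not_true, beq_eq_false_iff_ne, ne_eq] at this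
      rw [PySem.Int.mod_eq_zero_iff_dvd] at this
      refine this ?_
      have : (kk:ℤ) ∣ ((num.toNat : ℤ)) := by
        rw [Int.natCast_dvd_natCast]
        exact ⟨m, by rw [hkk, Nat.mul_comm]⟩
      rwa [hnum] at this

-- ===== VERDICT (by name: the statement is the Claim_ definition above) =====
theorem check_spec : Claim_equal_check := by
  intro num _
  unfold Spec_check
  by_cases hneg : num < 0
  · simp [check, check_alt, hneg]
  · have h0 : 0 ≤ num := by omega
    simp only [check, check_alt, if_neg hneg]
    rw [fib_eq num h0]
    by_cases hp : (PySem.Int.mod num 2 == 0) = true <;>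
      simp only [hp, Bool.false_eq_true, if_true, if_false] <;>
    (by_cases hf : isFibB num = true <;>
      simp only [hf, Bool.false_eq_true, if_true, if_false] <;>
    (by_cases h2 : (num == 2) = true
     · simp only [h2, if_true]
       simp [String.append_assoc]
     · simp only [h2, Bool.false_eq_true, if_false]
       by_cases h1 : (num == 1) = true
       · simp only [h1, if_true]
         simp [String.append_assoc]
       · simp only [h1, Bool.false_eq_true, if_false]
         rw [primo_eq num h0 (by simpa using h1) (by simpa using h2)]
         by_cases hpr : ((PySem.List.pyRange 2 ((isqrtB num.toNat : Int) + 1) 1).all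
             (fun d => !(PySem.Int.mod num d == 0))) = true <;>
           simp only [hpr, Bool.false_eq_true, if_true, if_false] <;>
           simp [String.append_assoc]))
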